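-- pv_equiv track=rewrite | github.com/cmu-db/cmdbac | core/drivers/count/count.py | count_query
-- ===== SOURCE A (Python) =====
-- keywords = ['SELECT', 'INSERT', 'UPDATE', 'DELETE']
--
-- def count_query(queries):
-- 	ret = {}
-- 	for keyword in keywords:
-- 		ret[keyword] = 0
-- 	ret['OTHERS'] = 0
-- 	for query in queries:
-- 		counted = False
-- 		for keyword in keywords:
-- 			if keyword in query:
-- 				ret[keyword] += 1
-- 				counted = True
-- 		if not counted:
-- 			ret['OTHERS'] += 1
-- 	return ret
-- ===== SOURCE B (Python) =====
-- # B: per-keyword passes (one countP-style scan per keyword) instead of A's single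
-- # fused pass with an inner loop and a 'counted' flag; objective: simpler decomposition.
-- keywords = ['SELECT', 'INSERT', 'UPDATE', 'DELETE']
--
-- def count_query(queries):
--     ret = {kw: sum(1 for q in queries if kw in q) for kw in keywords}
--     ret['OTHERS'] = sum(1 for q in queries if not any(kw in q for kw in keywords))
--     return ret
-- ===== Notes on version B (the rewrite author's own statement) =====
-- stated objective: simpler
-- what changed: Replaces A's single fused pass over queries (inner keyword loop plus a 'counted' flag mutating a shared dict) by independent per-keyword scans: one count per keyword and one membership-recheck scan for OTHERS, assembled as a dict comprehension.
import Mathlib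
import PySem

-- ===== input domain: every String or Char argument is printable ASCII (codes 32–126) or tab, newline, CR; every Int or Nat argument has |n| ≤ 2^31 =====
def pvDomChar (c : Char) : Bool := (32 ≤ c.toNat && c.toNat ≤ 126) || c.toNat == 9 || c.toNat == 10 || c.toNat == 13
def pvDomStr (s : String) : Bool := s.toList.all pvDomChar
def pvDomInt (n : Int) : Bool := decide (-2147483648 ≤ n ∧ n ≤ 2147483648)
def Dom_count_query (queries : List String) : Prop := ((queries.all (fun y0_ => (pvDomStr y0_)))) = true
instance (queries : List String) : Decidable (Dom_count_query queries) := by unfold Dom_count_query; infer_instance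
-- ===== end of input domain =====

-- B replaces A's single fused pass (inner keyword loop + 'counted' flag mutating a shared
-- dict) by independent per-keyword counting scans plus a membership-recheck scan for OTHERS
-- (objective: simpler decomposition; same asymptotic cost).

-- ===== PORT A =====
def pvKeywords : List String := ["SELECT", "INSERT", "UPDATE", "DELETE"]

def count_query (queries : List String) : List (String × Int) :=
  let ret : PySem.Dict String Int :=
    pvKeywords.foldl (fun d kw => d.insert kw 0) PySem.Dict.empty
  let ret := ret.insert "OTHERS" 0
  let ret := queries.foldl (fun d query =>
    let st := pvKeywords.foldl
      (fun (s : PySem.Dict String Int × Bool) kw =>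
        if PySem.Str.isIn kw query then (s.1.modify kw 0 (· + 1), true) else s)
      (d, false)
    if !st.2 then st.1.modify "OTHERS" 0 (· + 1) else st.1) ret
  ret.items

-- ===== PORT B =====
def count_query_alt (queries : List String) : List (String × Int) :=
  pvKeywords.map (fun kw => (kw, (queries.countP (fun q => PySem.Str.isIn kw q) : Int)))
    ++ [("OTHERS", (queries.countP (fun q => !(pvKeywords.any (fun kw => PySem.Str.isIn kw q))) : Int))]

-- ===== PRECONDITION & SPEC =====
def Spec_count_query (queries : List String) (out : List (String × Int)) : Prop := out = count_query_alt queries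
instance (queries : List String) (out : List (String × Int)) : Decidable (Spec_count_query queries out) := by unfold Spec_count_query; infer_instance

-- ===== CLAIM (what is proved, stated in full; the proofs are below) =====
def Claim_equal_count_query : Prop := ∀ (queries : List String), Dom_count_query queries → Spec_count_query queries (count_query queries)

-- ===== LEMMAS AND PROOFS =====

/-- The dict state of A's loop: the five keys in insertion order with their counters. -/
def pvMkd (a b c d e : Int) : PySem.Dict String Int :=
  PySem.Dict.mk [("SELECT",a),("INSERT",b),("UPDATE",c),("DELETE",d),("OTHERS",e)]

def pvBi (b : Bool) : Int := if b then 1 else 0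

set_option maxHeartbeats 1000000 in
/-- One iteration of A's outer loop on the canonical dict state. -/
lemma pv_step (q : String) (a b c d e : Int) :
    (let st := pvKeywords.foldl
        (fun (s : PySem.Dict String Int × Bool) kw =>
          if PySem.Str.isIn kw q then (s.1.modify kw 0 (· + 1), true) else s)
        (pvMkd a b c d e, false)
     if !st.2 then st.1.modify "OTHERS" 0 (· + 1) else st.1)
    = pvMkd (a + pvBi (PySem.Str.isIn "SELECT" q)) (b + pvBi (PySem.Str.isIn "INSERT" q))
        (c + pvBi (PySem.Str.isIn "UPDATE" q)) (d + pvBi (PySem.Str.isIn "DELETE" q))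
        (e + pvBi (!(pvKeywords.any (fun kw => PySem.Str.isIn kw q)))) := by
  cases h1 : PySem.Str.isIn "SELECT" q <;> cases h2 : PySem.Str.isIn "INSERT" q <;>
    cases h3 : PySem.Str.isIn "UPDATE" q <;> cases h4 : PySem.Str.isIn "DELETE" q <;>
    simp only [PySem.Str.isIn_eq,
      show "SELECT".toList = ['S','E','L','E','C','T'] from rfl,
      show "INSERT".toList = ['I','N','S','E','R','T'] from rfl,
      show "UPDATE".toList = ['U','P','D','A','T','E'] from rfl,
      show "DELETE".toList = ['D','E','L','E','T','E'] from rfl] at h1 h2 h3 h4 <;>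
    simp [pvKeywords, pvMkd, pvBi, h1, h2, h3, h4, PySem.Dict.modify,
      PySem.Dict.insert, PySem.Dict.getD, PySem.Dict.get?, PySem.Dict.contains]

lemma pvMkd_congr {a b c d e a' b' c' d' e' : Int}
    (h1 : a = a') (h2 : b = b') (h3 : c = c') (h4 : d = d') (h5 : e = e') :
    pvMkd a b c d e = pvMkd a' b' c' d' e' := by
  rw [h1, h2, h3, h4, h5]

set_option maxHeartbeats 1000000 in
/-- A's outer loop adds the per-keyword counts componentwise. -/
lemma pv_loop (queries : List String) (a b c d e : Int) :
    queries.foldl (fun (dct : PySem.Dict String Int) (query : String) =>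
      let st := pvKeywords.foldl
        (fun (s : PySem.Dict String Int × Bool) kw =>
          if PySem.Str.isIn kw query then (s.1.modify kw 0 (· + 1), true) else s)
        (dct, false)
      if !st.2 then st.1.modify "OTHERS" 0 (· + 1) else st.1) (pvMkd a b c d e)
    = pvMkd (a + (queries.countP (fun q => PySem.Str.isIn "SELECT" q) : Int))
        (b + (queries.countP (fun q => PySem.Str.isIn "INSERT" q) : Int))
        (c + (queries.countP (fun q => PySem.Str.isIn "UPDATE" q) : Int))
        (d + (queries.countP (fun q => PySem.Str.isIn "DELETE" q) : Int))
        (e + (queries.countP (fun q => !(pvKeywords.any (fun kw => PySem.Str.isIn kw q))) : Int)) := by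
  induction queries generalizing a b c d e with
  | nil => simp
  | cons q qs ih =>
    rw [List.foldl_cons, pv_step, ih]
    apply pvMkd_congr <;>
      (simp only [List.countP_cons, pvBi]; split_ifs <;> push_cast <;> ring)

-- ===== VERDICT (by name: the statement is the Claim_ definition above) =====
theorem count_query_spec : Claim_equal_count_query := by
  intro queries _
  unfold Spec_count_query count_query
  have hinit : (pvKeywords.foldl (fun d kw => d.insert kw 0) PySem.Dict.empty).insert "OTHERS" 0
      = pvMkd 0 0 0 0 0 := by decide
  simp only [hinit, pv_loop, zero_add]
  rfl
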